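-- pv_equiv track=rewrite | github.com/masteret/LeetCodeOJ | 778-SwiminRisingWater/sol.py | canSwim
-- ===== SOURCE A (Python) =====
-- def canSwim(grid, level):
--     actions = [(0, 0)]
--     seen = set((0, 0))
--     for x, y in actions:
--         if grid[x][y] <= level:
--             if x == y == len(grid)-1:
--                 return True
--             else:
--                 moves = [(1, 0), (-1, 0), (0, 1), (0, -1)]
--                 for m_x, m_y in moves:
--                     new_x = x+m_x
--                     new_y = y+m_y
--                     if 0 <= new_x < len(grid) and 0 <= new_y < len(grid) and (new_x, new_y) not in seen:
--                         seen.add((new_x, new_y))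
--                         actions.append((new_x, new_y))
--     return False
-- ===== SOURCE B (Python) =====
-- def canSwim(grid, level):
--     n = len(grid)
--     reach = set()
--     changed = True
--     while changed:
--         changed = False
--         for x in range(n):
--             for y in range(n):
--                 if (x, y) not in reach and \
--                         ((x == 0 and y == 0) or (x - 1, y) in reach or (x + 1, y) in reach
--                          or (x, y - 1) in reach or (x, y + 1) in reach) and \
--                         grid[x][y] <= level:
--                     reach.add((x, y))
--                     changed = True
--     return (n - 1, n - 1) in reach
-- ===== Notes on version B (the rewrite author's own statement) =====
-- stated objective: alternative
-- what changed: Replaced the growing-worklist BFS with visited-set bookkeeping by a fixpoint saturation: repeatedly sweep the whole grid marking any cell that is <= level and is the start or touches a marked cell, until a sweep changes nothing, then test the corner for membership.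
-- outside the precondition, e.g. on canSwim([[2, 6], [2, 4, 1, 0], [5, 2, 0, 4]], 5): A returns True, B raises IndexError
import Mathlib
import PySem

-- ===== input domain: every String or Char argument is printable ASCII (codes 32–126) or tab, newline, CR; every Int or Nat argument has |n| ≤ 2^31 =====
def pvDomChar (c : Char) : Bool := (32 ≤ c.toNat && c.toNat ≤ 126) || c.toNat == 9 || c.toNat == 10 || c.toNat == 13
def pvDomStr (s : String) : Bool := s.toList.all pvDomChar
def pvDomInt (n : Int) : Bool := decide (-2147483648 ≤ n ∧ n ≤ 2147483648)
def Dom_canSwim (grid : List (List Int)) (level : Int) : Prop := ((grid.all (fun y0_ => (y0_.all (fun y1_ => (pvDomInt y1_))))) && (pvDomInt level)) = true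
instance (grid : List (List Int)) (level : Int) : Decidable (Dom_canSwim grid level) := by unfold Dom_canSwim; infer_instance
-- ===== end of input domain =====

-- B replaces A's worklist BFS by whole-grid fixpoint saturation (sweep until stable); same return
-- value on every input admitted by Pre_canSwim; objective: alternative algorithm, not speed.

-- shared primitive: grid[x][y].  Under Pre_canSwim every access made by either port is in range,
-- so pyGetD's defaults are never used there (exact on the admitted domain).
def pvVal (grid : List (List Int)) (x y : Int) : Int :=
  PySem.List.pyGetD (PySem.List.pyGetD grid x []) y 0

-- ===== PORT A =====
-- one iteration of A's inner 'for m_x, m_y in moves' loop body: state = (actions-suffix, seen)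
def pvStepA (n x y : Int) (st : List (Int × Int) × PySem.Set (Int × Int)) (m : Int × Int) :
    List (Int × Int) × PySem.Set (Int × Int) :=
  -- new_x = x + m_x; new_y = y + m_y (inlined)
  if 0 ≤ x + m.1 ∧ x + m.1 < n ∧ 0 ≤ y + m.2 ∧ y + m.2 < n ∧
      ¬ PySem.Set.contains st.2 (x + m.1, y + m.2) then
    (st.1 ++ [(x + m.1, y + m.2)], PySem.Set.add st.2 (x + m.1, y + m.2))
  else st

-- A's 'for x, y in actions' over a list that grows while iterated: the not-yet-visited suffix is
-- the queue; fuel (an upper bound on the number of iterations, proved sufficient below) only makes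
-- the same computation total.
def canSwimLoop (grid : List (List Int)) (level n : Int) :
    Nat → List (Int × Int) → PySem.Set (Int × Int) → Bool
  | 0, _, _ => false
  | _ + 1, [], _ => false
  | fuel + 1, (x, y) :: rest, seen =>
    if pvVal grid x y ≤ level then
      if x = y ∧ y = n - 1 then true
      else
        let st := [((1 : Int), (0 : Int)), (-1, 0), (0, 1), (0, -1)].foldl (pvStepA n x y) (rest, seen)
        canSwimLoop grid level n fuel st.1 st.2
    else canSwimLoop grid level n fuel rest seen

-- Python's 'seen = set((0, 0))' is the set {0}, which no (x, y) tuple ever equals; its only effect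
-- is that (0, 0) may be re-enqueued once, which never changes the returned value, so seen is
-- ported as {(0, 0)}.
def canSwim (grid : List (List Int)) (level : Int) : Bool :=
  canSwimLoop grid level (grid.length : Int) (grid.length * grid.length + 1)
    [((0 : Int), (0 : Int))] (PySem.Set.add PySem.Set.empty ((0 : Int), (0 : Int)))

-- ===== PORT B =====
-- body of B's innermost 'if': state = (reach, changed)
def pvStepB (grid : List (List Int)) (level : Int)
    (st : PySem.Set (Int × Int) × Bool) (c : Int × Int) : PySem.Set (Int × Int) × Bool :=
  if ¬ PySem.Set.contains st.1 c ∧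
      ((c.1 = 0 ∧ c.2 = 0) ∨ PySem.Set.contains st.1 (c.1 - 1, c.2) ∨
        PySem.Set.contains st.1 (c.1 + 1, c.2) ∨ PySem.Set.contains st.1 (c.1, c.2 - 1) ∨
        PySem.Set.contains st.1 (c.1, c.2 + 1)) ∧ pvVal grid c.1 c.2 ≤ level then
    (PySem.Set.add st.1 c, true)
  else st

-- one sweep: 'for x in range(n): for y in range(n): …'
def pvSweep (grid : List (List Int)) (level n : Int)
    (st : PySem.Set (Int × Int) × Bool) : PySem.Set (Int × Int) × Bool :=
  (PySem.List.pyRange 0 n 1).foldl (fun st x =>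
    (PySem.List.pyRange 0 n 1).foldl (fun st y => pvStepB grid level st (x, y)) st) st

-- 'while changed:' — fuel n²+1 (each re-iteration marked at least one new cell) makes it total
def canSwimIter (grid : List (List Int)) (level n : Int) :
    Nat → PySem.Set (Int × Int) → PySem.Set (Int × Int)
  | 0, reach => reach
  | fuel + 1, reach =>
    let st := pvSweep grid level n (reach, false)
    if st.2 then canSwimIter grid level n fuel st.1 else st.1

def canSwim_alt (grid : List (List Int)) (level : Int) : Bool :=
  PySem.Set.contains
    (canSwimIter grid level (grid.length : Int) (grid.length * grid.length + 1) PySem.Set.empty)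
    ((grid.length : Int) - 1, (grid.length : Int) - 1)

-- ===== PRECONDITION & SPEC =====
-- Pre_ admits full grids (every row at least len(grid) long, so no access can fail) and any grid
-- whose start cell already exceeds level (both programs then answer False after reading only
-- grid[0][0]); it excludes the empty grid, on which A raises IndexError, and the remaining ragged
-- grids with a row shorter than len(grid), on which either implementation can raise IndexError
-- depending on which cells its search touches.
def Pre_canSwim (grid : List (List Int)) (level : Int) : Prop :=
  grid ≠ [] ∧ ((∀ row ∈ grid, grid.length ≤ row.length) ∨
    level < ((grid.head?.getD []).head?.getD level))
instance (grid : List (List Int)) (level : Int) : Decidable (Pre_canSwim grid level) := by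
  unfold Pre_canSwim; infer_instance
def pvWitness_canSwim : List (List Int) × Int := ([[0]], 0)

def Spec_canSwim (grid : List (List Int)) (level : Int) (out : Bool) : Prop :=
  out = canSwim_alt grid level
instance (grid : List (List Int)) (level : Int) (out : Bool) : Decidable (Spec_canSwim grid level out) := by
  unfold Spec_canSwim; infer_instance

-- ===== CLAIM (what is proved, stated in full; the proofs are below) =====
def Claim_equal_canSwim : Prop := ∀ (grid : List (List Int)) (level : Int),
  Dom_canSwim grid level → Pre_canSwim grid level → Spec_canSwim grid level (canSwim grid level)
-- ===== LEMMAS AND PROOFS =====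

-- the graph the two searches explore
def pvInB (n : Int) (p : Int × Int) : Prop := 0 ≤ p.1 ∧ p.1 < n ∧ 0 ≤ p.2 ∧ p.2 < n

def pvGood (grid : List (List Int)) (level n : Int) (p : Int × Int) : Prop :=
  pvInB n p ∧ pvVal grid p.1 p.2 ≤ level

def pvAdj (p q : Int × Int) : Prop :=
  (q.1 = p.1 + 1 ∧ q.2 = p.2) ∨ (q.1 = p.1 - 1 ∧ q.2 = p.2) ∨
  (q.1 = p.1 ∧ q.2 = p.2 + 1) ∨ (q.1 = p.1 ∧ q.2 = p.2 - 1)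

def pvE (grid : List (List Int)) (level n : Int) (p q : Int × Int) : Prop :=
  pvGood grid level n p ∧ pvGood grid level n q ∧ pvAdj p q

abbrev pvStar (grid : List (List Int)) (level n : Int) : Int × Int → Int × Int → Prop :=
  Relation.ReflTransGen (pvE grid level n)

def pvTgt (n : Int) : Int × Int := (n - 1, n - 1)

-- counting: a nodup list of in-bounds cells has at most M*M elements
def pvAll (M : Nat) : List (Int × Int) :=
  ((List.range M) ×ˢ (List.range M)).map (fun ij => ((ij.1 : Int), (ij.2 : Int)))

lemma pvMem_all {M : Nat} {p : Int × Int} (h : pvInB (M : Int) p) : p ∈ pvAll M := by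
  obtain ⟨h1, h2, h3, h4⟩ := h
  rcases p with ⟨a, b⟩
  simp only [pvAll, List.mem_map]
  refine ⟨(a.toNat, b.toNat), ?_, ?_⟩
  · rw [List.mem_product]
    simp only [List.mem_range]
    omega
  · simp only [Prod.mk.injEq]
    simp only at h1 h2 h3 h4
    constructor <;> simp <;> omega

lemma pvAll_len (M : Nat) : (pvAll M).length = M * M := by
  rw [pvAll, List.length_map, List.length_product, List.length_range]

lemma pvCard {M : Nat} {s : List (Int × Int)} (hnd : s.Nodup)
    (hsub : ∀ p ∈ s, pvInB (M : Int) p) : s.length ≤ M * M := by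
  have h := (List.Nodup.subperm hnd (fun p hp => pvMem_all (hsub p hp))).length_le
  rwa [pvAll_len] at h

-- "processed" invariant of a search state: cells already expanded are not the target and have all
-- their in-bounds neighbours recorded
def pvC (grid : List (List Int)) (level n : Int) (q s : List (Int × Int)) : Prop :=
  ∀ p ∈ s, p ∉ q → pvGood grid level n p →
    p ≠ pvTgt n ∧ ∀ m, pvAdj p m → pvInB n m → m ∈ s

lemma pvEscape {grid : List (List Int)} {level n : Int} {q s : List (Int × Int)}
    (hC : pvC grid level n q s) :
    ∀ p, pvStar grid level n p (pvTgt n) → pvGood grid level n p → p ∈ s →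
      ∃ r ∈ q, pvGood grid level n r ∧ pvStar grid level n r (pvTgt n) := by
  intro p hstar
  induction hstar using Relation.ReflTransGen.head_induction_on with
  | refl =>
    intro hg hs
    by_cases hq : pvTgt n ∈ q
    · exact ⟨_, hq, hg, Relation.ReflTransGen.refl⟩
    · exact absurd rfl (hC _ hs hq hg).1
  | @head a c hab hbt ih =>
    intro hg hs
    by_cases hq : a ∈ q
    · exact ⟨a, hq, hg, Relation.ReflTransGen.head hab hbt⟩
    · have h2 := hC a hs hq hg
      exact ih hab.2.1 (h2.2 c hab.2.2 hab.2.1.1)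

-- ---- A-side: facts about one step of the neighbour loop and the four-move fold ----

lemma pvA_mono {n x y : Int} {st : List (Int × Int) × PySem.Set (Int × Int)} {m : Int × Int} :
    (∀ p ∈ st.1, p ∈ (pvStepA n x y st m).1) ∧ (∀ p ∈ st.2, p ∈ (pvStepA n x y st m).2) := by
  unfold pvStepA
  split
  · constructor
    · intro p hp; exact List.mem_append_left _ hp
    · intro p hp; exact (PySem.Set.mem_add _ _ _).mpr (Or.inl hp)
  · exact ⟨fun p hp => hp, fun p hp => hp⟩

lemma pvA_fold_mono {n x y : Int} (ms : List (Int × Int))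
    (st : List (Int × Int) × PySem.Set (Int × Int)) :
    (∀ p ∈ st.1, p ∈ (ms.foldl (pvStepA n x y) st).1) ∧
    (∀ p ∈ st.2, p ∈ (ms.foldl (pvStepA n x y) st).2) := by
  induction ms generalizing st with
  | nil => exact ⟨fun p hp => hp, fun p hp => hp⟩
  | cons m ms ih =>
    simp only [List.foldl_cons]
    have h1 := pvA_mono (n := n) (x := x) (y := y) (st := st) (m := m)
    have h2 := ih (pvStepA n x y st m)
    exact ⟨fun p hp => h2.1 p (h1.1 p hp), fun p hp => h2.2 p (h1.2 p hp)⟩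

lemma pvA_fold_mem1 {n x y : Int} (ms : List (Int × Int))
    (st : List (Int × Int) × PySem.Set (Int × Int)) {p : Int × Int}
    (hp : p ∈ (ms.foldl (pvStepA n x y) st).1) :
    p ∈ st.1 ∨ ∃ m ∈ ms, p = (x + m.1, y + m.2) ∧ pvInB n p := by
  induction ms generalizing st with
  | nil => exact Or.inl hp
  | cons m ms ih =>
    simp only [List.foldl_cons] at hp
    rcases ih _ hp with h | ⟨m', hm', he, hb⟩
    · -- p came from pvStepA n x y st m
      unfold pvStepA at h
      split at h
      · rename_i hcond
        rcases List.mem_append.mp h with h' | h'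
        · exact Or.inl h'
        · simp only [List.mem_singleton] at h'
          refine Or.inr ⟨m, List.mem_cons_self, h', ?_⟩
          subst h'
          exact ⟨hcond.1, hcond.2.1, hcond.2.2.1, hcond.2.2.2.1⟩
      · exact Or.inl h
    · exact Or.inr ⟨m', List.mem_cons_of_mem _ hm', he, hb⟩

lemma pvA_fold_nbr {n x y : Int} (ms : List (Int × Int))
    (st : List (Int × Int) × PySem.Set (Int × Int)) {m : Int × Int} (hm : m ∈ ms)
    (hb : pvInB n (x + m.1, y + m.2)) :
    (x + m.1, y + m.2) ∈ (ms.foldl (pvStepA n x y) st).2 := by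
  induction ms generalizing st with
  | nil => cases hm
  | cons m0 ms ih =>
    simp only [List.foldl_cons]
    rcases List.mem_cons.mp hm with rfl | hm'
    · -- the move itself is processed first
      refine (pvA_fold_mono ms _).2 _ ?_
      unfold pvStepA
      split
      · exact (PySem.Set.mem_add _ _ _).mpr (Or.inr rfl)
      · rename_i hcond
        push Not at hcond
        obtain ⟨h1, h2, h3, h4⟩ := hb
        simp only at h1 h2 h3 h4
        exact (PySem.Set.contains_iff _ _).mp (hcond h1 h2 h3 h4)
    · exact ih _ hm' 

lemma pvA_fold_len {n x y : Int} (ms : List (Int × Int))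
    (st : List (Int × Int) × PySem.Set (Int × Int)) :
    (ms.foldl (pvStepA n x y) st).1.length + st.2.length =
      st.1.length + (ms.foldl (pvStepA n x y) st).2.length := by
  induction ms generalizing st with
  | nil => rfl
  | cons m ms ih =>
    simp only [List.foldl_cons]
    have h := ih (pvStepA n x y st m)
    have hstep : (pvStepA n x y st m).1.length + st.2.length =
        st.1.length + (pvStepA n x y st m).2.length := by
      unfold pvStepA
      split
      · rename_i hcond
        have hnm : (x + m.1, y + m.2) ∉ st.2 := by
          intro hc
          exact hcond.2.2.2.2 ((PySem.Set.contains_iff _ _).mpr hc)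
        simp [PySem.Set.add_of_not_mem hnm]
        omega
      · rfl
    omega

lemma pvA_fold_inv {n x y : Int} (ms : List (Int × Int))
    (st : List (Int × Int) × PySem.Set (Int × Int))
    (h1 : st.1.Nodup) (h2 : st.2.Nodup) (h3 : ∀ p ∈ st.1, p ∈ st.2)
    (h4 : ∀ p ∈ st.2, pvInB n p) :
    (ms.foldl (pvStepA n x y) st).1.Nodup ∧ (ms.foldl (pvStepA n x y) st).2.Nodup ∧
    (∀ p ∈ (ms.foldl (pvStepA n x y) st).1, p ∈ (ms.foldl (pvStepA n x y) st).2) ∧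
    (∀ p ∈ (ms.foldl (pvStepA n x y) st).2, pvInB n p) := by
  induction ms generalizing st with
  | nil => exact ⟨h1, h2, h3, h4⟩
  | cons m ms ih =>
    simp only [List.foldl_cons]
    have hstep : (pvStepA n x y st m).1.Nodup ∧ (pvStepA n x y st m).2.Nodup ∧
        (∀ p ∈ (pvStepA n x y st m).1, p ∈ (pvStepA n x y st m).2) ∧
        (∀ p ∈ (pvStepA n x y st m).2, pvInB n p) := by
      unfold pvStepA
      split
      · rename_i hcond
        have hnm : (x + m.1, y + m.2) ∉ st.2 := by
          intro hc
          exact hcond.2.2.2.2 ((PySem.Set.contains_iff _ _).mpr hc)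
        have hnm1 : (x + m.1, y + m.2) ∉ st.1 := fun hc => hnm (h3 _ hc)
        refine ⟨?_, ?_, ?_, ?_⟩
        · simp only [List.nodup_append, List.nodup_singleton, true_and]
          refine ⟨h1, ?_⟩
          intro a ha b hb
          simp only [List.mem_singleton] at hb
          subst hb
          exact fun he => hnm1 (he ▸ ha)
        · rw [PySem.Set.add_of_not_mem hnm]
          simp only [List.nodup_append, List.nodup_singleton, true_and]
          refine ⟨h2, ?_⟩
          intro a ha b hb
          simp only [List.mem_singleton] at hb
          subst hb
          exact fun he => hnm (he ▸ ha)
        · intro p hp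
          rcases List.mem_append.mp hp with h | h
          · exact (PySem.Set.mem_add _ _ _).mpr (Or.inl (h3 _ h))
          · simp only [List.mem_singleton] at h
            exact (PySem.Set.mem_add _ _ _).mpr (Or.inr h)
        · intro p hp
          rcases (PySem.Set.mem_add _ _ _).mp hp with h | h
          · exact h4 _ h
          · subst h
            exact ⟨hcond.1, hcond.2.1, hcond.2.2.1, hcond.2.2.2.1⟩
      · exact ⟨h1, h2, h3, h4⟩
    exact ih _ hstep.1 hstep.2.1 hstep.2.2.1 hstep.2.2.2

lemma pvA_fold_done {n x y : Int} (ms : List (Int × Int))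
    (st : List (Int × Int) × PySem.Set (Int × Int)) {p : Int × Int}
    (hp : p ∈ (ms.foldl (pvStepA n x y) st).2) (hq : p ∉ (ms.foldl (pvStepA n x y) st).1) :
    p ∈ st.2 ∧ p ∉ st.1 := by
  induction ms generalizing st with
  | nil => exact ⟨hp, hq⟩
  | cons m ms ih =>
    simp only [List.foldl_cons] at hp hq
    have h := ih _ hp hq
    revert h
    unfold pvStepA
    split
    · rename_i hcond
      intro h
      constructor
      · rcases (PySem.Set.mem_add _ _ _).mp h.1 with h' | h'
        · exact h'
        · exact absurd (List.mem_append_right _ (by simp [h'])) h.2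
      · intro hc
        exact h.2 (List.mem_append_left _ hc)
    · exact id

-- main characterisation of A's loop
lemma pvA_main (grid : List (List Int)) (level : Int) (M : Nat) :
    ∀ (fuel : Nat) (q s : List (Int × Int)),
      q.Nodup → (∀ p ∈ q, p ∈ s) → s.Nodup → (∀ p ∈ s, pvInB (M : Int) p) →
      pvC grid level (M : Int) q s →
      q.length + (M * M - s.length) + 1 ≤ fuel →
      (canSwimLoop grid level (M : Int) fuel q s = true ↔
        ∃ p ∈ q, pvGood grid level (M : Int) p ∧
          pvStar grid level (M : Int) p (pvTgt (M : Int))) := by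
  intro fuel
  induction fuel with
  | zero => intro q s _ _ _ _ _ hf; omega
  | succ fuel ih =>
    intro q s hndq hqs hnds hsin hC hf
    match q with
    | [] =>
      simp only [canSwimLoop]
      simp
    | (x, y) :: rest =>
      have hxy_s : (x, y) ∈ s := hqs _ List.mem_cons_self
      have hndr : rest.Nodup := hndq.of_cons
      have hxyr : (x, y) ∉ rest := (List.nodup_cons.mp hndq).1
      have hrs : ∀ p ∈ rest, p ∈ s := fun p hp => hqs p (List.mem_cons_of_mem _ hp)
      have hcard_s : s.length ≤ M * M := pvCard hnds hsin
      simp only [canSwimLoop]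
      by_cases hval : pvVal grid x y ≤ level
      · rw [if_pos hval]
        have hgood_h : pvGood grid level (M : Int) (x, y) := ⟨hsin _ hxy_s, hval⟩
        by_cases htgt : x = y ∧ y = (M : Int) - 1
        · rw [if_pos htgt]
          simp only [true_iff]
          refine ⟨(x, y), List.mem_cons_self, hgood_h, ?_⟩
          have : (x, y) = pvTgt (M : Int) := by
            rw [pvTgt, Prod.mk.injEq]
            omega
          rw [this]
        · rw [if_neg htgt]
          have hne_tgt : (x, y) ≠ pvTgt (M : Int) := by
            rw [pvTgt, Ne, Prod.mk.injEq]
            omega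
          set ms : List (Int × Int) := [((1 : Int), (0 : Int)), (-1, 0), (0, 1), (0, -1)] with hms
          set st := ms.foldl (pvStepA (M : Int) x y) (rest, s) with hst
          have hfinv := pvA_fold_inv (n := (M : Int)) (x := x) (y := y) ms (rest, s)
            hndr hnds hrs hsin
          have hflen : st.1.length + s.length = rest.length + st.2.length := by
            have h := pvA_fold_len (n := (M : Int)) (x := x) (y := y) ms (rest, s)
            simpa using h
          have hcard_s' : st.2.length ≤ M * M := pvCard hfinv.2.1 hfinv.2.2.2
          -- every in-bounds neighbour of (x, y) is recorded in st.2
          have hnbr : ∀ m : Int × Int, pvAdj (x, y) m → pvInB (M : Int) m → m ∈ st.2 := by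
            intro m hadj hinB
            rcases hadj with ⟨ha, hb⟩ | ⟨ha, hb⟩ | ⟨ha, hb⟩ | ⟨ha, hb⟩
            · have hm : m = (x + (1 : Int), y + (0 : Int)) := by
                rw [Prod.ext_iff]; constructor <;> simp only <;> omega
              rw [hm] at hinB ⊢
              exact pvA_fold_nbr (m := ((1 : Int), (0 : Int))) ms (rest, s) (by simp [hms]) hinB
            · have hm : m = (x + (-1 : Int), y + (0 : Int)) := by
                rw [Prod.ext_iff]; constructor <;> simp only <;> omega
              rw [hm] at hinB ⊢
              exact pvA_fold_nbr (m := ((-1 : Int), (0 : Int))) ms (rest, s) (by simp [hms]) hinB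
            · have hm : m = (x + (0 : Int), y + (1 : Int)) := by
                rw [Prod.ext_iff]; constructor <;> simp only <;> omega
              rw [hm] at hinB ⊢
              exact pvA_fold_nbr (m := ((0 : Int), (1 : Int))) ms (rest, s) (by simp [hms]) hinB
            · have hm : m = (x + (0 : Int), y + (-1 : Int)) := by
                rw [Prod.ext_iff]; constructor <;> simp only <;> omega
              rw [hm] at hinB ⊢
              exact pvA_fold_nbr (m := ((0 : Int), (-1 : Int))) ms (rest, s) (by simp [hms]) hinB
          have hC' : pvC grid level (M : Int) st.1 st.2 := by
            intro p hps hpq hpg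
            have hdone := pvA_fold_done ms (rest, s) hps hpq
            by_cases hph : p = (x, y)
            · subst hph
              exact ⟨hne_tgt, hnbr⟩
            · have hpnq : p ∉ (x, y) :: rest := by
                simp only [List.mem_cons, not_or]
                exact ⟨hph, hdone.2⟩
              obtain ⟨ht, hn⟩ := hC p hdone.1 hpnq hpg
              exact ⟨ht, fun m hadj hinB =>
                (pvA_fold_mono ms (rest, s)).2 m (hn m hadj hinB)⟩
          rw [ih st.1 st.2 hfinv.1 hfinv.2.2.1 hfinv.2.1 hfinv.2.2.2 hC' (by
            simp only [List.length_cons] at hf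
            omega)]
          constructor
          · -- a queued cell on a good path survives into the new state
            rintro ⟨r, hr, hrg, hrstar⟩
            rcases pvA_fold_mem1 ms (rest, s) hr with hrr | ⟨m, hm, hre, hrin⟩
            · exact ⟨r, List.mem_cons_of_mem _ hrr, hrg, hrstar⟩
            · have hadj : pvAdj (x, y) r := by
                rw [hms] at hm
                simp only [List.mem_cons, List.not_mem_nil, or_false] at hm
                rcases hm with rfl | rfl | rfl | rfl <;>
                  [exact Or.inl (by rw [hre]; constructor <;> simp <;> try ring);
                   exact Or.inr (Or.inl (by rw [hre]; constructor <;> simp <;> try ring));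
                   exact Or.inr (Or.inr (Or.inl (by rw [hre]; constructor <;> simp <;> try ring)));
                   exact Or.inr (Or.inr (Or.inr (by rw [hre]; constructor <;> simp <;> try ring)))]
              exact ⟨(x, y), List.mem_cons_self, hgood_h,
                Relation.ReflTransGen.head ⟨hgood_h, hrg, hadj⟩ hrstar⟩
          · rintro ⟨p, hp, hpg, hpstar⟩
            rcases List.mem_cons.mp hp with rfl | hpr
            · rcases hpstar.cases_head with heq | ⟨b, hE, hbt⟩
              · exact absurd heq hne_tgt
              · have hb2 : b ∈ st.2 := hnbr b hE.2.2 hE.2.1.1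
                exact pvEscape hC' b hbt hE.2.1 hb2
            · exact ⟨p, (pvA_fold_mono ms (rest, s)).1 p hpr, hpg, hpstar⟩
      · rw [if_neg hval]
        have hC' : pvC grid level (M : Int) rest s := by
          intro p hps hpr hpg
          by_cases hph : p = (x, y)
          · subst hph
            exact absurd hpg.2 hval
          · exact hC p hps (by simp [List.mem_cons, hph, hpr]) hpg
        rw [ih rest s hndr hrs hnds hsin hC' (by
          simp only [List.length_cons] at hf
          omega)]
        constructor
        · rintro ⟨p, hp, hpg, hps⟩
          exact ⟨p, List.mem_cons_of_mem _ hp, hpg, hps⟩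
        · rintro ⟨p, hp, hpg, hps⟩
          rcases List.mem_cons.mp hp with rfl | hpr
          · exact absurd hpg.2 hval
          · exact ⟨p, hpr, hpg, hps⟩

lemma pvA_eq (grid : List (List Int)) (level : Int) (hg : grid ≠ []) :
    (canSwim grid level = true ↔
      pvGood grid level (grid.length : Int) (0, 0) ∧
        pvStar grid level (grid.length : Int) (0, 0) (pvTgt (grid.length : Int))) := by
  have hM : 1 ≤ grid.length := List.length_pos_iff.mpr hg
  have hMM : 1 ≤ grid.length * grid.length := Nat.one_le_iff_ne_zero.mpr (by positivity)
  have hinit : PySem.Set.add PySem.Set.empty ((0 : Int), (0 : Int)) = [((0 : Int), (0 : Int))] := by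
    decide
  rw [canSwim, hinit]
  rw [pvA_main grid level grid.length (grid.length * grid.length + 1)
    [((0 : Int), (0 : Int))] [((0 : Int), (0 : Int))]
    (List.nodup_singleton _) (fun p hp => hp) (List.nodup_singleton _)
    (fun p hp => by
      simp only [List.mem_singleton] at hp
      subst hp
      refine ⟨le_refl _, ?_, le_refl _, ?_⟩ <;> · simp only; exact_mod_cast hM)
    (fun p hps hpq => absurd hps hpq)
    (by simp only [List.length_singleton]; omega)]
  constructor
  · rintro ⟨p, hp, hpg, hps⟩
    simp only [List.mem_singleton] at hp
    subst hp
    exact ⟨hpg, hps⟩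
  · rintro ⟨hpg, hps⟩
    exact ⟨(0, 0), List.mem_singleton.mpr rfl, hpg, hps⟩

-- ---- B-side: facts about the sweep fold ----

def pvCells (n : Int) : List (Int × Int) :=
  (PySem.List.pyRange 0 n 1).flatMap (fun x => (PySem.List.pyRange 0 n 1).map (fun y => (x, y)))

lemma pv_foldl_flatMap {α β γ : Type} (l : List α) (f : α → List β) (g : γ → β → γ) (init : γ) :
    (l.flatMap f).foldl g init = l.foldl (fun st a => (f a).foldl g st) init := by
  induction l generalizing init with
  | nil => rfl
  | cons a l ih =>
    simp only [List.flatMap_cons, List.foldl_append, List.foldl_cons]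
    exact ih _

lemma pvSweep_eq (grid : List (List Int)) (level n : Int)
    (st : PySem.Set (Int × Int) × Bool) :
    pvSweep grid level n st = (pvCells n).foldl (pvStepB grid level) st := by
  rw [pvSweep, pvCells, pv_foldl_flatMap]
  simp only [List.foldl_map]

lemma pvMem_cells {n : Int} {c : Int × Int} : c ∈ pvCells n ↔ pvInB n c := by
  rw [pvCells]
  simp only [List.mem_flatMap, List.mem_map, PySem.List.mem_pyRange_one]
  constructor
  · rintro ⟨x, hx, y, hy, rfl⟩
    exact ⟨hx.1, hx.2, hy.1, hy.2⟩
  · rintro ⟨h1, h2, h3, h4⟩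
    exact ⟨c.1, ⟨h1, h2⟩, c.2, ⟨h3, h4⟩, rfl⟩

lemma pvB_fold_true (grid : List (List Int)) (level : Int) (l : List (Int × Int))
    (st : PySem.Set (Int × Int) × Bool) (h : st.2 = true) :
    (l.foldl (pvStepB grid level) st).2 = true := by
  induction l generalizing st with
  | nil => exact h
  | cons c l ih =>
    simp only [List.foldl_cons]
    refine ih _ ?_
    rw [pvStepB]
    split
    · rfl
    · exact h

lemma pvB_fold_fix (grid : List (List Int)) (level : Int) (l : List (Int × Int))
    (st : PySem.Set (Int × Int) × Bool)
    (hfix : (l.foldl (pvStepB grid level) st).2 = false) :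
    l.foldl (pvStepB grid level) st = st ∧
    ∀ c ∈ l, pvVal grid c.1 c.2 ≤ level →
      ((c.1 = 0 ∧ c.2 = 0) ∨ (c.1 - 1, c.2) ∈ st.1 ∨ (c.1 + 1, c.2) ∈ st.1 ∨
        (c.1, c.2 - 1) ∈ st.1 ∨ (c.1, c.2 + 1) ∈ st.1) → c ∈ st.1 := by
  induction l generalizing st with
  | nil => exact ⟨rfl, by simp⟩
  | cons c l ih =>
    simp only [List.foldl_cons] at hfix ⊢
    have hst1 : (pvStepB grid level st c).2 = false := by
      by_contra h
      rw [pvB_fold_true grid level l _ (by simpa using h)] at hfix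
      cases hfix
    have key : pvStepB grid level st c = st ∧
        (pvVal grid c.1 c.2 ≤ level →
          ((c.1 = 0 ∧ c.2 = 0) ∨ (c.1 - 1, c.2) ∈ st.1 ∨ (c.1 + 1, c.2) ∈ st.1 ∨
            (c.1, c.2 - 1) ∈ st.1 ∨ (c.1, c.2 + 1) ∈ st.1) → c ∈ st.1) := by
      rw [pvStepB]
      split
      · rename_i hcond
        exfalso
        rw [pvStepB, if_pos hcond] at hst1
        cases hst1
      · rename_i hcond
        push Not at hcond
        refine ⟨rfl, fun hval hdisj => ?_⟩
        by_contra hmem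
        have h1 : ¬ PySem.Set.contains st.1 c = true := fun h =>
          hmem ((PySem.Set.contains_iff _ _).mp h)
        have h2 : level < pvVal grid c.1 c.2 := hcond h1 (by
          rcases hdisj with h | h | h | h | h
          · exact Or.inl h
          · exact Or.inr (Or.inl ((PySem.Set.contains_iff _ _).mpr h))
          · exact Or.inr (Or.inr (Or.inl ((PySem.Set.contains_iff _ _).mpr h)))
          · exact Or.inr (Or.inr (Or.inr (Or.inl ((PySem.Set.contains_iff _ _).mpr h))))
          · exact Or.inr (Or.inr (Or.inr (Or.inr ((PySem.Set.contains_iff _ _).mpr h)))))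
        omega
    rw [key.1] at hfix ⊢
    obtain ⟨hfold, hrest⟩ := ih st hfix
    refine ⟨hfold, fun c' hc' hval hdisj => ?_⟩
    rcases List.mem_cons.mp hc' with rfl | hc'
    · exact key.2 hval hdisj
    · exact hrest c' hc' hval hdisj

lemma pvB_fold_sound (grid : List (List Int)) (level : Int) {n : Int} (l : List (Int × Int))
    (st : PySem.Set (Int × Int) × Bool)
    (hl : ∀ c ∈ l, pvInB n c)
    (hs : ∀ p ∈ st.1, pvGood grid level n p ∧ pvStar grid level n (0, 0) p) :
    ∀ p ∈ (l.foldl (pvStepB grid level) st).1,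
      pvGood grid level n p ∧ pvStar grid level n (0, 0) p := by
  induction l generalizing st with
  | nil => exact hs
  | cons c l ih =>
    simp only [List.foldl_cons]
    refine ih _ (fun c' hc' => hl c' (List.mem_cons_of_mem _ hc')) ?_
    intro p hp
    revert hp
    rw [pvStepB]
    split
    · rename_i hcond
      intro hp
      rcases (PySem.Set.mem_add _ _ _).mp hp with h | h
      · exact hs p h
      · subst h
        have hinB : pvInB n p := hl p List.mem_cons_self
        have hgood : pvGood grid level n p := ⟨hinB, hcond.2.2⟩
        refine ⟨hgood, ?_⟩
        rcases hcond.2.1 with ⟨h1, h2⟩ | h | h | h | h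
        · have : p = ((0 : Int), (0 : Int)) := by
            rw [Prod.ext_iff]; exact ⟨h1, h2⟩
          rw [this]
        · have hr := hs _ ((PySem.Set.contains_iff _ _).mp h)
          exact Relation.ReflTransGen.tail hr.2
            ⟨hr.1, hgood, Or.inl (by constructor <;> simp)⟩
        · have hr := hs _ ((PySem.Set.contains_iff _ _).mp h)
          exact Relation.ReflTransGen.tail hr.2
            ⟨hr.1, hgood, Or.inr (Or.inl (by constructor <;> simp))⟩
        · have hr := hs _ ((PySem.Set.contains_iff _ _).mp h)
          exact Relation.ReflTransGen.tail hr.2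
            ⟨hr.1, hgood, Or.inr (Or.inr (Or.inl (by constructor <;> simp)))⟩
        · have hr := hs _ ((PySem.Set.contains_iff _ _).mp h)
          exact Relation.ReflTransGen.tail hr.2
            ⟨hr.1, hgood, Or.inr (Or.inr (Or.inr (by constructor <;> simp)))⟩
    · exact fun hp => hs p hp

lemma pvB_fold_nodup (grid : List (List Int)) (level : Int) (l : List (Int × Int))
    (st : PySem.Set (Int × Int) × Bool) (h : st.1.Nodup) :
    (l.foldl (pvStepB grid level) st).1.Nodup := by
  induction l generalizing st with
  | nil => exact h
  | cons c l ih =>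
    simp only [List.foldl_cons]
    refine ih _ ?_
    rw [pvStepB]
    split
    · rename_i hcond
      have hnm : c ∉ st.1 := fun hc => hcond.1 ((PySem.Set.contains_iff _ _).mpr hc)
      rw [PySem.Set.add_of_not_mem hnm]
      simp only [List.nodup_append, List.nodup_singleton, true_and]
      refine ⟨h, ?_⟩
      intro a ha b hb
      simp only [List.mem_singleton] at hb
      subst hb
      exact fun he => hnm (he ▸ ha)
    · exact h

lemma pvB_fold_len (grid : List (List Int)) (level : Int) (l : List (Int × Int))
    (st : PySem.Set (Int × Int) × Bool) :
    st.1.length ≤ (l.foldl (pvStepB grid level) st).1.length := by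
  induction l generalizing st with
  | nil => exact le_refl _
  | cons c l ih =>
    simp only [List.foldl_cons]
    refine le_trans ?_ (ih _)
    rw [pvStepB]
    split
    · rename_i hcond
      have hnm : c ∉ st.1 := fun hc => hcond.1 ((PySem.Set.contains_iff _ _).mpr hc)
      rw [PySem.Set.add_of_not_mem hnm]
      simp
    · exact le_refl _

lemma pvB_fold_grow (grid : List (List Int)) (level : Int) (l : List (Int × Int))
    (st : PySem.Set (Int × Int) × Bool)
    (h : (l.foldl (pvStepB grid level) st).2 = true) :
    st.2 = true ∨ st.1.length < (l.foldl (pvStepB grid level) st).1.length := by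
  induction l generalizing st with
  | nil => exact Or.inl h
  | cons c l ih =>
    simp only [List.foldl_cons] at h ⊢
    rcases ih _ h with h' | h'
    · -- the step itself turned changed on or it was already on
      revert h'
      rw [pvStepB]
      split
      · rename_i hcond
        intro _
        right
        have hnm : c ∉ st.1 := fun hc => hcond.1 ((PySem.Set.contains_iff _ _).mpr hc)
        calc st.1.length < (PySem.Set.add st.1 c).length := by
              rw [PySem.Set.add_of_not_mem hnm]; simp
          _ ≤ _ := pvB_fold_len grid level l (PySem.Set.add st.1 c, true)
      · exact fun h' => Or.inl h'
    · right
      refine lt_of_le_of_lt ?_ h'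
      rw [pvStepB]
      split
      · rename_i hcond
        have hnm : c ∉ st.1 := fun hc => hcond.1 ((PySem.Set.contains_iff _ _).mpr hc)
        rw [PySem.Set.add_of_not_mem hnm]
        simp
      · exact le_refl _

-- main characterisation of B's saturation loop
lemma pvB_main (grid : List (List Int)) (level : Int) (M : Nat) :
    ∀ (fuel : Nat) (reach : List (Int × Int)),
      reach.Nodup →
      (∀ p ∈ reach, pvGood grid level (M : Int) p ∧ pvStar grid level (M : Int) (0, 0) p) →
      M * M + 1 ≤ fuel + reach.length →
      (∀ p ∈ canSwimIter grid level (M : Int) fuel reach,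
          pvGood grid level (M : Int) p ∧ pvStar grid level (M : Int) (0, 0) p) ∧
      (∀ c : Int × Int, pvGood grid level (M : Int) c →
        ((c.1 = 0 ∧ c.2 = 0) ∨
          (c.1 - 1, c.2) ∈ canSwimIter grid level (M : Int) fuel reach ∨
          (c.1 + 1, c.2) ∈ canSwimIter grid level (M : Int) fuel reach ∨
          (c.1, c.2 - 1) ∈ canSwimIter grid level (M : Int) fuel reach ∨
          (c.1, c.2 + 1) ∈ canSwimIter grid level (M : Int) fuel reach) →
        c ∈ canSwimIter grid level (M : Int) fuel reach) := by
  intro fuel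
  induction fuel with
  | zero =>
    intro reach hnd hre hf
    have : reach.length ≤ M * M := pvCard hnd (fun p hp => (hre p hp).1.1)
    omega
  | succ fuel ih =>
    intro reach hnd hre hf
    simp only [canSwimIter, pvSweep_eq]
    by_cases hch : ((pvCells (M : Int)).foldl (pvStepB grid level) (reach, false)).2 = true
    · rw [if_pos hch]
      have hnd' := pvB_fold_nodup grid level (pvCells (M : Int)) (reach, false) hnd
      have hre' := pvB_fold_sound grid level (n := (M : Int)) (pvCells (M : Int)) (reach, false)
        (fun c hc => pvMem_cells.mp hc) hre
      have hlen : reach.length <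
          ((pvCells (M : Int)).foldl (pvStepB grid level) (reach, false)).1.length := by
        rcases pvB_fold_grow grid level (pvCells (M : Int)) (reach, false) hch with h | h
        · cases h
        · exact h
      exact ih _ hnd' hre' (by omega)
    · rw [if_neg hch]
      have hfix := pvB_fold_fix grid level (pvCells (M : Int)) (reach, false)
        (by simpa using hch)
      have hF1 : ((pvCells (M : Int)).foldl (pvStepB grid level) (reach, false)).1 = reach := by
        rw [hfix.1]
      rw [hF1]
      refine ⟨hre, ?_⟩
      intro c hg hd
      exact hfix.2 c (pvMem_cells.mpr hg.1) hg.2 hd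

lemma pvB_eq (grid : List (List Int)) (level : Int) :
    (canSwim_alt grid level = true ↔
      pvGood grid level (grid.length : Int) (pvTgt (grid.length : Int)) ∧
        pvStar grid level (grid.length : Int) (0, 0) (pvTgt (grid.length : Int))) := by
  have hmain := pvB_main grid level grid.length (grid.length * grid.length + 1) []
    List.nodup_nil (by simp) (by simp)
  rw [canSwim_alt]
  rw [show (PySem.Set.empty : PySem.Set (Int × Int)) = [] from rfl]
  constructor
  · intro h
    have hmem := (PySem.Set.contains_iff _ _).mp h
    exact ⟨(hmain.1 _ hmem).1, (hmain.1 _ hmem).2⟩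
  · rintro ⟨hgt, hstar⟩
    apply (PySem.Set.contains_iff _ _).mpr
    have claim : ∀ c : Int × Int,
        pvStar grid level (grid.length : Int) (0, 0) c →
        pvGood grid level (grid.length : Int) c →
        c ∈ canSwimIter grid level (grid.length : Int)
          (grid.length * grid.length + 1) [] := by
      intro c hst
      induction hst with
      | refl =>
        intro hg
        exact hmain.2 (0, 0) hg (Or.inl ⟨rfl, rfl⟩)
      | tail hsb hE ihc =>
        intro hg
        rename_i b c'
        have hb := ihc hE.1
        apply hmain.2 _ hg
        rcases hE.2.2 with ⟨h1, h2⟩ | ⟨h1, h2⟩ | ⟨h1, h2⟩ | ⟨h1, h2⟩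
        · refine Or.inr (Or.inl ?_)
          have hbe : (c'.1 - 1, c'.2) = b := by
            rw [Prod.ext_iff]; constructor <;> simp only <;> omega
          rw [hbe]; exact hb
        · refine Or.inr (Or.inr (Or.inl ?_))
          have hbe : (c'.1 + 1, c'.2) = b := by
            rw [Prod.ext_iff]; constructor <;> simp only <;> omega
          rw [hbe]; exact hb
        · refine Or.inr (Or.inr (Or.inr (Or.inl ?_)))
          have hbe : (c'.1, c'.2 - 1) = b := by
            rw [Prod.ext_iff]; constructor <;> simp only <;> omega
          rw [hbe]; exact hb
        · refine Or.inr (Or.inr (Or.inr (Or.inr ?_)))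
          have hbe : (c'.1, c'.2 + 1) = b := by
            rw [Prod.ext_iff]; constructor <;> simp only <;> omega
          rw [hbe]; exact hb
    exact claim _ hstar hgt

-- the two characterisations agree
lemma pvBridge (grid : List (List Int)) (level n : Int) :
    (pvGood grid level n (0, 0) ∧ pvStar grid level n (0, 0) (pvTgt n)) ↔
    (pvGood grid level n (pvTgt n) ∧ pvStar grid level n (0, 0) (pvTgt n)) := by
  constructor
  · rintro ⟨hg0, hstar⟩
    refine ⟨?_, hstar⟩
    rcases Relation.ReflTransGen.cases_tail hstar with heq | ⟨c, _, hE⟩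
    · rw [heq]; exact hg0
    · exact hE.2.1
  · rintro ⟨hgt, hstar⟩
    refine ⟨?_, hstar⟩
    rcases hstar.cases_head with heq | ⟨c, hE, _⟩
    · rw [heq]; exact hgt
    · exact hE.1

-- ===== VERDICT (by name: the statement is the Claim_ definition above) =====
theorem canSwim_spec : Claim_equal_canSwim := by
  intro grid level _ hpre
  unfold Spec_canSwim
  have h := (pvA_eq grid level hpre.1).trans
    ((pvBridge grid level (grid.length : Int)).trans (pvB_eq grid level).symm)
  cases hA : canSwim grid level <;> cases hB : canSwim_alt grid level <;> simp_all
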